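-- pv_equiv track=rewrite | github.com/abc740966/image_filter | image.py | brighten
-- ===== SOURCE A (Python) =====
-- def inbounds(r, c, raster):
--     # Check if the row and column index is in range.
--     return 0 <= r < len(raster) and 0 <= c < len(raster[r])
--
-- def get_brighten_row(raster, row, col):
--     """Get the values surrounded a specific element and put them into a list
--     for getting the maximum in the brighten function"""
--     # Determine whether the value is on the corner or the edge
--     brighten_row = []
--     for r in range(row - 1, row + 2):
--         for c in range(col - 1, col + 2):
--             if inbounds(r, c, raster):
--                 brighten_row.append(raster[r][c])
--     return brighten_row
--
-- def brighten(raster):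
--     """Create a brightened version of the raster.
--
--     Raster is a rectangular list of lists of ints representing an image.
--     Each value in the returned result is the maximum value of a cell
--     and its 8 neighboring cells. Corner cells only have 3 neighbors
--     and edge cells not on the corner have 5 neighbors.
--     """
--     brighten_raster = []
--     for r in range(0, len(raster)):
--         rows = []
--         for c in range(0, len(raster[0])):
--             brighten_row = get_brighten_row(raster, r, c)
--             maxi = max(brighten_row)
--             rows.append(maxi)
--         brighten_raster.append(rows)
--     return brighten_raster
-- ===== SOURCE B (Python) =====
-- def brighten(raster):
--     """Separable 3x3 max filter: a horizontal 3-wide max pass over each row,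
--     then a vertical 3-high max pass over the row maxima."""
--     h = len(raster)
--     w = len(raster[0]) if raster else 0
--     tmp = [[max(row[max(c - 1, 0):c + 2]) for c in range(w)] for row in raster]
--     return [[max(tmp[rr][c] for rr in range(max(r - 1, 0), min(r + 2, h)))
--              for c in range(w)]
--             for r in range(h)]
-- ===== Notes on version B (the rewrite author's own statement) =====
-- stated objective: faster
-- what changed: Replaces A's per-cell gather of all 9 neighbours (helper call, 3x3 scan and one max per cell) with a separable max filter: one horizontal 3-wide max pass per row, then one vertical 3-high max pass over the row maxima; Pre_ excludes ragged rasters with an empty row or a row more than one column shorter than the first (first-row width > 0), where B's horizontal pass raises ValueError on an empty slice while A may still gather a value from neighbouring rows.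
-- outside the precondition, e.g. on brighten([[5], []]): A returns [[5], [5]], B raises ValueError; on brighten([[1, 2, 3], [9]]): A returns [[9, 9, 3], [9, 9, 3]], B raises ValueError
import Mathlib
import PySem

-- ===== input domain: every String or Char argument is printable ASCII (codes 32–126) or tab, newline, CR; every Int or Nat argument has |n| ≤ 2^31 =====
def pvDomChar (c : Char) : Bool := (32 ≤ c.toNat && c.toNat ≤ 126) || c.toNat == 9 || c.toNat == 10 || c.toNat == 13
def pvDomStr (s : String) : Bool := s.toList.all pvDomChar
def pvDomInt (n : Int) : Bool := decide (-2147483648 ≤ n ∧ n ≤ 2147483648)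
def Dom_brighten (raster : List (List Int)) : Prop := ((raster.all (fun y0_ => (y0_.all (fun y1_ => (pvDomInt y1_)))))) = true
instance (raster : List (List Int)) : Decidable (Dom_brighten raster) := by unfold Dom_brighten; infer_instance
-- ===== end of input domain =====

-- B replaces A's per-cell 9-neighbour gather by a separable max filter (a horizontal
-- 3-wide pass per row, then a vertical 3-high pass over the row maxima).

-- ===== PORT A =====
def inbounds (r c : Int) (raster : List (List Int)) : Bool :=
  (decide (0 ≤ r) && decide (r < (raster.length : Int))) &&
  (decide (0 ≤ c) && decide (c < ((((PySem.List.pyGet? raster r).getD []).length : Int))))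

def get_brighten_row (raster : List (List Int)) (row col : Int) : List Int :=
  (PySem.List.pyRange (row - 1) (row + 2) 1).foldl
    (fun acc r =>
      (PySem.List.pyRange (col - 1) (col + 2) 1).foldl
        (fun acc2 c =>
          if inbounds r c raster then
            acc2 ++ [PySem.List.pyGetD ((PySem.List.pyGet? raster r).getD []) c 0]
          else acc2)
        acc)
    []

-- A's max(brighten_row) raises ValueError on an empty list; Pre_brighten (rectangular
-- rasters) excludes those inputs, so the `.getD 0` default is never reached inside Pre_.
def brighten (raster : List (List Int)) : List (List Int) :=
  (PySem.List.pyRange 0 (raster.length : Int) 1).foldl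
    (fun acc r =>
      acc ++ [(PySem.List.pyRange 0 ((raster.headD []).length : Int) 1).foldl
        (fun rows c =>
          rows ++ [(PySem.List.max? (get_brighten_row raster r c) (fun v => v)).getD 0]) []])
    []

-- ===== PORT B =====
-- separable max filter; Source B's `max(...)` raises ValueError on an empty slice or
-- empty window, unreached inside Pre_, so `.getD 0` is unreached there too.
def brighten_alt (raster : List (List Int)) : List (List Int) :=
  let h : Int := (raster.length : Int)
  let w : Int := if raster.isEmpty then 0 else ((raster.headD []).length : Int)
  let tmp : List (List Int) := raster.map (fun row =>
    (PySem.List.pyRange 0 w 1).map (fun c =>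
      (PySem.List.max? (PySem.List.slice row (some (max (c - 1) 0)) (some (c + 2)))
        (fun v => v)).getD 0))
  (PySem.List.pyRange 0 h 1).map (fun r =>
    (PySem.List.pyRange 0 w 1).map (fun c =>
      (PySem.List.max? ((PySem.List.pyRange (max (r - 1) 0) (min (r + 2) h) 1).map
        (fun rr => PySem.List.pyGetD (PySem.List.pyGetD tmp rr []) c 0))
        (fun v => v)).getD 0))

-- ===== PRECONDITION & SPEC =====
-- Pre_ excludes the ragged rasters with an empty row or a row more than one column
-- shorter than the first (with first-row width w > 0): there B's horizontal pass takes
-- max of an empty slice and raises ValueError, while A may still return a value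
-- gathered from neighbouring rows (or raise ValueError itself on an empty 3x3 window).
def Pre_brighten (raster : List (List Int)) : Prop :=
  (raster.headD []).length = 0 ∨
    ∀ row ∈ raster, max ((raster.headD []).length - 1) 1 ≤ row.length
instance (raster : List (List Int)) : Decidable (Pre_brighten raster) := by
  unfold Pre_brighten; infer_instance
def pvWitness_brighten : List (List Int) := [[1, 2], [3, 4]]

def Spec_brighten (raster : List (List Int)) (out : List (List Int)) : Prop := out = brighten_alt raster
instance (raster : List (List Int)) (out : List (List Int)) : Decidable (Spec_brighten raster out) := by unfold Spec_brighten; infer_instance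

-- ===== CLAIM (what is proved, stated in full; the proofs are below) =====
def Claim_equal_brighten : Prop := ∀ (raster : List (List Int)), Dom_brighten raster → Pre_brighten raster → Spec_brighten raster (brighten raster)

-- ===== LEMMAS AND PROOFS =====

-- `max?` with identity key: basic facts
theorem maxv_ne_none (x : Int) (xs : List Int) :
    PySem.List.max? (x :: xs) (fun v => v) ≠ none := by
  suffices h : ∀ (l : List Int) (a : Int), ∃ m, PySem.List.max? (a :: l) (fun v => v) = some m by
    obtain ⟨m, hm⟩ := h xs x; simp [hm]
  intro l
  induction l with
  | nil => intro a; exact ⟨a, rfl⟩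
  | cons y ys ih =>
    intro a
    simp only [PySem.List.max?, List.foldl] at *
    by_cases h : a < y <;> simp [h] <;> [exact ih y; exact ih a]

theorem maxv_eq_none_iff (xs : List Int) :
    PySem.List.max? xs (fun v => v) = none ↔ xs = [] := by
  cases xs with
  | nil => simp [PySem.List.max?]
  | cons x l => simp only [List.cons_ne_nil, iff_false]; exact maxv_ne_none x l

theorem maxv_eq_some_of {xs : List Int} {m : Int}
    (hmem : m ∈ xs) (hb : ∀ x ∈ xs, x ≤ m) :
    PySem.List.max? xs (fun v => v) = some m := by
  cases h : PySem.List.max? xs (fun v => v) with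
  | none =>
    rw [maxv_eq_none_iff] at h; subst h; simp at hmem
  | some m' =>
    have h1 : m' ∈ xs := PySem.List.max?_mem h
    have h2 : m ≤ m' := PySem.List.max?_isMax h m hmem
    have h3 : m' ≤ m := hb m' h1
    have : m' = m := le_antisymm h3 h2
    rw [this]

theorem maxv_congr {l1 l2 : List Int} (h : ∀ x, x ∈ l1 ↔ x ∈ l2) :
    PySem.List.max? l1 (fun v => v) = PySem.List.max? l2 (fun v => v) := by
  cases h1 : PySem.List.max? l1 (fun v => v) with
  | none =>
    rw [maxv_eq_none_iff] at h1; subst h1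
    rw [eq_comm, maxv_eq_none_iff, List.eq_nil_iff_forall_not_mem]
    intro x hx; exact (by simpa using (h x).2 hx)
  | some m =>
    have hm : m ∈ l2 := (h m).1 (PySem.List.max?_mem h1)
    have hb : ∀ x ∈ l2, x ≤ m := fun x hx =>
      PySem.List.max?_isMax h1 x ((h x).2 hx)
    exact (maxv_eq_some_of hm hb).symm

-- max of the per-segment maxima = max of the concatenation
theorem maxv_filterMap_maxv (L : List (List Int)) :
    PySem.List.max? (L.filterMap (fun s => PySem.List.max? s (fun v => v))) (fun v => v)
      = PySem.List.max? L.flatten (fun v => v) := by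
  cases h1 : PySem.List.max? (L.filterMap (fun s => PySem.List.max? s (fun v => v))) (fun v => v) with
  | none =>
    rw [maxv_eq_none_iff, List.filterMap_eq_nil_iff] at h1
    rw [eq_comm, maxv_eq_none_iff, List.flatten_eq_nil_iff]
    intro s hs
    have := h1 s hs
    rwa [maxv_eq_none_iff] at this
  | some m =>
    have hmem := PySem.List.max?_mem h1
    rw [List.mem_filterMap] at hmem
    obtain ⟨s, hsL, hsm⟩ := hmem
    have hmf : m ∈ L.flatten := List.mem_flatten.2 ⟨s, hsL, PySem.List.max?_mem hsm⟩
    have hb : ∀ x ∈ L.flatten, x ≤ m := by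
      intro x hx
      obtain ⟨s', hs'L, hxs'⟩ := List.mem_flatten.1 hx
      cases h2 : PySem.List.max? s' (fun v => v) with
      | none => rw [maxv_eq_none_iff] at h2; subst h2; simp at hxs'
      | some ms =>
        have hxms : x ≤ ms := PySem.List.max?_isMax h2 x hxs'
        have hmsm : ms ≤ m := PySem.List.max?_isMax h1 ms
          (List.mem_filterMap.2 ⟨s', hs'L, h2⟩)
        omega
    exact (maxv_eq_some_of hmf hb).symm

-- when every segment is nonempty, taking each segment's max (with a dead default)
-- is a filterMap of max?
theorem map_maxv_getD_eq_filterMap (L : List (List Int)) (h : ∀ s ∈ L, s ≠ []) :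
    L.map (fun s => (PySem.List.max? s (fun v => v)).getD 0)
      = L.filterMap (fun s => PySem.List.max? s (fun v => v)) := by
  induction L with
  | nil => rfl
  | cons s L ih =>
    have hs : s ≠ [] := h s (List.mem_cons_self ..)
    cases hm : PySem.List.max? s (fun v => v) with
    | none => rw [maxv_eq_none_iff] at hm; exact absurd hm hs
    | some m =>
      simp only [List.map_cons, List.filterMap_cons, hm, Option.getD_some]
      rw [ih (fun s' hs' => h s' (List.mem_cons_of_mem _ hs'))]

-- the horizontal segment row[max(c-1,0):c+2]
def hseg (row : List Int) (c : Int) : List Int :=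
  PySem.List.slice row (some (max (c - 1) 0)) (some (c + 2))

theorem mem_hseg {row : List Int} {c x : Int} (hc : 0 ≤ c) :
    x ∈ hseg row c ↔ ∃ cc : Int, c - 1 ≤ cc ∧ cc < c + 2 ∧ 0 ≤ cc ∧
      ∃ hcc : cc.toNat < row.length, row[cc.toNat] = x := by
  unfold hseg
  rw [PySem.List.slice_toNat row (by omega) (by omega)]
  constructor
  · intro hx
    obtain ⟨i, hi, hix⟩ := List.mem_iff_getElem.1 hx
    simp only [List.length_take, List.length_drop] at hi
    refine ⟨(((max (c - 1) 0).toNat + i : Nat) : Int), by omega, by omega, by omega, by omega, ?_⟩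
    rw [← hix, List.getElem_take, List.getElem_drop]
    congr 1
  · rintro ⟨cc, h1, h2, h3, hcc, hval⟩
    rw [List.mem_iff_getElem]
    refine ⟨cc.toNat - (max (c - 1) 0).toNat, ?_, ?_⟩
    · simp only [List.length_take, List.length_drop]; omega
    · rw [List.getElem_take, List.getElem_drop, ← hval]
      congr 1; omega

theorem hseg_ne_nil {row : List Int} {c : Int} (hc : 0 ≤ c)
    (hle : c ≤ (row.length : Int)) (hpos : 0 < row.length) : hseg row c ≠ [] := by
  unfold hseg
  rw [PySem.List.slice_toNat row (by omega) (by omega)]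
  rw [Ne, ← List.length_eq_zero_iff]
  simp only [List.length_take, List.length_drop]
  omega

-- membership in A's neighbour gather
theorem mem_gbr {raster : List (List Int)} {r c x : Int} :
    x ∈ get_brighten_row raster r c ↔
      ∃ rr : Int, r - 1 ≤ rr ∧ rr < r + 2 ∧ 0 ≤ rr ∧ rr < (raster.length : Int) ∧
        ∃ cc : Int, c - 1 ≤ cc ∧ cc < c + 2 ∧ 0 ≤ cc ∧
          ∃ hrr : rr.toNat < raster.length,
          ∃ hcc : cc.toNat < (raster[rr.toNat]).length,
            (raster[rr.toNat])[cc.toNat] = x := by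
  unfold get_brighten_row
  simp only [PySem.List.foldl_append_if, PySem.List.foldl_append_eq_flatMap]
  simp only [List.nil_append, List.mem_flatMap, List.mem_map, List.mem_filter,
    PySem.List.mem_pyRange_one, inbounds, Bool.and_eq_true, decide_eq_true_eq]
  constructor
  · rintro ⟨rr, ⟨hrr1, hrr2⟩, cc, ⟨⟨hcc1, hcc2⟩, ⟨⟨hr0, hrh⟩, ⟨hc0, hclen⟩⟩⟩, hval⟩
    have hrrN : rr.toNat < raster.length := by omega
    have hrow : (PySem.List.pyGet? raster rr).getD [] = raster[rr.toNat] := by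
      show PySem.List.pyGetD raster rr [] = _
      exact PySem.List.pyGetD_eq_getElem raster [] hr0 hrh
    rw [hrow] at hval hclen
    exact ⟨rr, hrr1, hrr2, hr0, hrh, cc, hcc1, hcc2, hc0, hrrN, by omega, by
      rw [← hval]
      exact (PySem.List.pyGetD_eq_getElem _ 0 hc0 hclen).symm⟩
  · rintro ⟨rr, hrr1, hrr2, hr0, hrh, cc, hcc1, hcc2, hc0, hrrN, hccN, hval⟩
    have hrow : (PySem.List.pyGet? raster rr).getD [] = raster[rr.toNat] := by
      show PySem.List.pyGetD raster rr [] = _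
      exact PySem.List.pyGetD_eq_getElem raster [] hr0 hrh
    refine ⟨rr, ⟨hrr1, hrr2⟩, cc, ⟨⟨hcc1, hcc2⟩, ⟨⟨hr0, hrh⟩, ⟨hc0, ?_⟩⟩⟩, ?_⟩
    · rw [hrow]; omega
    · rw [hrow, ← hval]
      exact PySem.List.pyGetD_eq_getElem _ 0 hc0 (by omega)

-- membership in the flattened vertical window of B's segments
theorem mem_window_flatten {raster : List (List Int)} {r c x : Int}
    (_hr0 : 0 ≤ r) (hrh : r < (raster.length : Int)) (hc : 0 ≤ c) :
    x ∈ ((PySem.List.pyRange (max (r - 1) 0) (min (r + 2) (raster.length : Int)) 1).map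
          (fun rr => hseg ((PySem.List.pyGet? raster rr).getD []) c)).flatten ↔
      ∃ rr : Int, r - 1 ≤ rr ∧ rr < r + 2 ∧ 0 ≤ rr ∧ rr < (raster.length : Int) ∧
        ∃ cc : Int, c - 1 ≤ cc ∧ cc < c + 2 ∧ 0 ≤ cc ∧
          ∃ hrr : rr.toNat < raster.length,
          ∃ hcc : cc.toNat < (raster[rr.toNat]).length,
            (raster[rr.toNat])[cc.toNat] = x := by
  simp only [List.mem_flatten, List.mem_map]
  constructor
  · rintro ⟨seg, ⟨rr, hrrmem, hsegeq⟩, hxseg⟩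
    rw [PySem.List.mem_pyRange_one] at hrrmem
    have hr0' : 0 ≤ rr := by omega
    have hrh' : rr < (raster.length : Int) := by omega
    have hrow : (PySem.List.pyGet? raster rr).getD [] = raster[rr.toNat] := by
      show PySem.List.pyGetD raster rr [] = _
      exact PySem.List.pyGetD_eq_getElem raster [] hr0' hrh'
    rw [← hsegeq, hrow] at hxseg
    obtain ⟨cc, h1, h2, h3, hcc, hval⟩ := (mem_hseg hc).1 hxseg
    exact ⟨rr, by omega, by omega, hr0', hrh', cc, h1, h2, h3, by omega, hcc, hval⟩
  · rintro ⟨rr, hrr1, hrr2, hr0', hrh', cc, hcc1, hcc2, hc0, hrrN, hccN, hval⟩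
    have hrow : (PySem.List.pyGet? raster rr).getD [] = raster[rr.toNat] := by
      show PySem.List.pyGetD raster rr [] = _
      exact PySem.List.pyGetD_eq_getElem raster [] hr0' hrh'
    refine ⟨hseg (raster[rr.toNat]) c, ⟨rr, ?_, by rw [hrow]⟩, ?_⟩
    · rw [PySem.List.mem_pyRange_one]; omega
    · exact (mem_hseg hc).2 ⟨cc, hcc1, hcc2, hc0, hccN, hval⟩

-- B's window of tmp-values = the per-segment maxima of the hsegs (rectangular raster)
theorem window_eq_map_maxv {raster : List (List Int)} {r c : Int}
    (_hr0 : 0 ≤ r) (hrh : r < (raster.length : Int))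
    (hc0 : 0 ≤ c) (hcw : c < ((raster.headD []).length : Int)) :
    ((PySem.List.pyRange (max (r - 1) 0) (min (r + 2) (raster.length : Int)) 1).map
      (fun rr => PySem.List.pyGetD
        (PySem.List.pyGetD (raster.map (fun row =>
          (PySem.List.pyRange 0 ((raster.headD []).length : Int) 1).map (fun cc =>
            (PySem.List.max? (PySem.List.slice row (some (max (cc - 1) 0)) (some (cc + 2)))
              (fun v => v)).getD 0))) rr []) c 0))
      = ((PySem.List.pyRange (max (r - 1) 0) (min (r + 2) (raster.length : Int)) 1).map
          (fun rr => hseg ((PySem.List.pyGet? raster rr).getD []) c)).map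
          (fun s => (PySem.List.max? s (fun v => v)).getD 0) := by
  rw [List.map_map]
  apply List.map_congr_left
  intro rr hrrmem
  rw [PySem.List.mem_pyRange_one] at hrrmem
  have hr0' : 0 ≤ rr := by omega
  have hrh' : rr < (raster.length : Int) := by omega
  have hrow : (PySem.List.pyGet? raster rr).getD [] = raster[rr.toNat]'(by omega) := by
    show PySem.List.pyGetD raster rr [] = _
    exact PySem.List.pyGetD_eq_getElem raster [] hr0' hrh'
  have htmp : PySem.List.pyGetD (raster.map (fun row =>
        (PySem.List.pyRange 0 ((raster.headD []).length : Int) 1).map (fun cc =>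
          (PySem.List.max? (PySem.List.slice row (some (max (cc - 1) 0)) (some (cc + 2)))
            (fun v => v)).getD 0))) rr []
      = (PySem.List.pyRange 0 ((raster.headD []).length : Int) 1).map (fun cc =>
          (PySem.List.max? (PySem.List.slice (raster[rr.toNat]'(by omega)) (some (max (cc - 1) 0)) (some (cc + 2)))
            (fun v => v)).getD 0) := by
    rw [PySem.List.pyGetD_eq_getElem _ [] hr0' (by simpa using hrh')]
    simp
  simp only [Function.comp, htmp, hrow]
  rw [PySem.List.pyGetD_map_pyRange_of_nonneg _ _ _ _ hc0 hcw]
  rfl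

-- per-cell equality: A's 9-neighbour max = B's vertical max of horizontal maxima
theorem cell_eq {raster : List (List Int)} {r c : Int}
    (hpre : Pre_brighten raster)
    (hr0 : 0 ≤ r) (hrh : r < (raster.length : Int))
    (hc0 : 0 ≤ c) (hcw : c < ((raster.headD []).length : Int)) :
    (PySem.List.max? (get_brighten_row raster r c) (fun v => v)).getD 0
      = (PySem.List.max?
          ((PySem.List.pyRange (max (r - 1) 0) (min (r + 2) (raster.length : Int)) 1).map
            (fun rr => PySem.List.pyGetD
              (PySem.List.pyGetD (raster.map (fun row =>
                (PySem.List.pyRange 0 ((raster.headD []).length : Int) 1).map (fun cc =>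
                  (PySem.List.max? (PySem.List.slice row (some (max (cc - 1) 0)) (some (cc + 2)))
                    (fun v => v)).getD 0))) rr []) c 0))
          (fun v => v)).getD 0 := by
  rw [window_eq_map_maxv hr0 hrh hc0 hcw]
  rw [map_maxv_getD_eq_filterMap]
  · rw [maxv_filterMap_maxv]
    rw [maxv_congr (fun x => (mem_gbr).trans (mem_window_flatten hr0 hrh hc0).symm)]
  · intro s hs
    rw [List.mem_map] at hs
    obtain ⟨rr, hrrmem, hseq⟩ := hs
    rw [PySem.List.mem_pyRange_one] at hrrmem
    have hr0' : 0 ≤ rr := by omega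
    have hrh' : rr < (raster.length : Int) := by omega
    have hrow : (PySem.List.pyGet? raster rr).getD [] = raster[rr.toNat]'(by omega) := by
      show PySem.List.pyGetD raster rr [] = _
      exact PySem.List.pyGetD_eq_getElem raster [] hr0' hrh'
    rw [← hseq, hrow]
    have hmem : raster[rr.toNat]'(by omega) ∈ raster := List.getElem_mem _
    have hlen : max ((raster.headD []).length - 1) 1 ≤ (raster[rr.toNat]'(by omega)).length := by
      rcases hpre with h0 | hall
      · omega
      · exact hall _ hmem
    exact hseg_ne_nil hc0 (by omega) (by omega)

-- ===== VERDICT (by name: the statement is the Claim_ definition above) =====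
theorem brighten_spec : Claim_equal_brighten := by
  intro raster _ hpre
  unfold Spec_brighten brighten brighten_alt
  simp only []
  rw [PySem.List.foldl_append_singleton_eq_map]
  have hw : (if raster.isEmpty then 0 else ((raster.headD []).length : Int))
      = ((raster.headD []).length : Int) := by
    cases raster <;> simp
  rw [hw]
  simp only [List.nil_append]
  apply List.map_congr_left
  intro r hr
  rw [PySem.List.mem_pyRange_one] at hr
  rw [PySem.List.foldl_append_singleton_eq_map]
  simp only [List.nil_append]
  apply List.map_congr_left
  intro c hc
  rw [PySem.List.mem_pyRange_one] at hc
  exact cell_eq hpre hr.1 hr.2 hc.1 hc.2
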